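-- pv_equiv track=rewrite | github.com/jgoy-labs/server-nexe | memory/embeddings/chunkers/code_chunker.py | _chunk_by_indentation
-- ===== SOURCE A (Python) =====
-- from typing import Any, Dict, List, Optional, Tuple
--
-- def _chunk_by_indentation(text: str) -> List[Tuple[str, Dict[str, Any]]]:
--   """
--   Fallback: chunk per blocs d'indentació.
--
--   Per llenguatges no suportats, separa per blocs a nivell 0.
--   """
--   lines = text.split("\n")
--   chunks: List[Tuple[str, Dict[str, Any]]] = []
--   current_block: List[str] = []
--
--   for line in lines:
--     if line.strip() and not line.startswith((" ", "\t")) and current_block: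
--       chunk_text = "\n".join(current_block).strip()
--       if chunk_text:
--         chunks.append((chunk_text, {"name": "block", "type": "block"}))
--       current_block = [line]
--     else:
--       current_block.append(line)
--
--   if current_block:
--     chunk_text = "\n".join(current_block).strip()
--     if chunk_text:
--       chunks.append((chunk_text, {"name": "block", "type": "block"}))
--
--   if not chunks:
--     return [(text, {"name": "module", "type": "module"})]
--
--   return chunks
-- ===== SOURCE B (Python) =====
-- from typing import Any, Dict, List, Tuple
--
-- def _chunk_by_indentation(text: str) -> List[Tuple[str, Dict[str, Any]]]:
--   """Two-phase recursive segmentation: first cut the line list into blocks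
--   (each block = one line plus the following indented/blank lines, found
--   recursively), then render each block and keep the non-empty ones."""
--   lines = text.split("\n")
--
--   def is_top(line: str) -> bool:
--     return bool(line.strip()) and not line.startswith((" ", "\t"))
--
--   def blocks(ls: List[str]) -> List[List[str]]:
--     if not ls:
--       return []
--     k = 1
--     while k < len(ls) and not is_top(ls[k]):
--       k += 1
--     return [ls[:k]] + blocks(ls[k:])
--
--   texts = ["\n".join(b).strip() for b in blocks(lines)]
--   chunks = [(t, {"name": "block", "type": "block"}) for t in texts if t]
--   if not chunks:
--     return [(text, {"name": "module", "type": "module"})]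
--   return chunks
-- ===== Notes on version B (the rewrite author's own statement) =====
-- stated objective: alternative
-- what changed: B replaces A's single-pass accumulate-and-flush loop by a two-phase design: a recursive segmentation that cuts the line list into blocks at top-level lines, followed by a separate join/strip/filter pass that renders the blocks.
import Mathlib
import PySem

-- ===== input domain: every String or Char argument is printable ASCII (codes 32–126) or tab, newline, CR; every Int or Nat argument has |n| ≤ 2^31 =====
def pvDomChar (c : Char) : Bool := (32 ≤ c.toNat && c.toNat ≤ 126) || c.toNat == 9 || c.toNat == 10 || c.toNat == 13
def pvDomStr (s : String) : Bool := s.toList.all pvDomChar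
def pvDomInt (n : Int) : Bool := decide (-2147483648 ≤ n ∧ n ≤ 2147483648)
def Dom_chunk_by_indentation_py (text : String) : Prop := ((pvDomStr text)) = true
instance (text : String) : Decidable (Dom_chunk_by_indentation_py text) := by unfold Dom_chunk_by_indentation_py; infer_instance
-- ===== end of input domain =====

-- B replaces A's accumulate-and-flush loop by a two-phase design (recursive segmentation
-- into blocks, then a separate join/strip/filter rendering pass); same return value,
-- alternative decomposition, no speed claim.

-- 'line.strip() and not line.startswith((" ", "\t"))' (the test both Pythons share)
def pvIsTop (line : String) : Bool :=
  (PySem.Str.strip line ≠ "") && !(PySem.Str.startswith line " " || PySem.Str.startswith line "\t")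

-- text.split("\n"): sep ≠ "" so split? is always some; the [] default is never used
def pvLines (text : String) : List String := (PySem.Str.split? text "\n").getD []

-- ===== PORT A =====
-- A's loop body: flush the accumulated block before a top-level line, else accumulate
def pvStepA (st : List (String × List (String × String)) × List String) (line : String) :
    List (String × List (String × String)) × List String :=
  if pvIsTop line && decide (st.2 ≠ []) then
    ((if PySem.Str.strip (PySem.Str.join "\n" st.2) ≠ "" then
        st.1 ++ [(PySem.Str.strip (PySem.Str.join "\n" st.2), [("name", "block"), ("type", "block")])]
      else st.1), [line])
  else (st.1, st.2 ++ [line])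

def chunk_by_indentation_py (text : String) : List (String × (List (String × String))) :=
  let st := (pvLines text).foldl pvStepA ([], [])
  let chunks :=
    if st.2 ≠ [] then
      if PySem.Str.strip (PySem.Str.join "\n" st.2) ≠ "" then
        st.1 ++ [(PySem.Str.strip (PySem.Str.join "\n" st.2), [("name", "block"), ("type", "block")])]
      else st.1
    else st.1
  if chunks = [] then [(text, [("name", "module"), ("type", "module")])] else chunks

-- ===== PORT B =====
-- B's 'blocks': the head line plus the run of non-top lines, then recurse on the rest
-- (the Python while loop scanning to the next top-level line = takeWhile/dropWhile)
def pvBlocks : List String → List (List String)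
  | [] => []
  | l :: rs =>
      (l :: rs.takeWhile (fun x => !pvIsTop x)) :: pvBlocks (rs.dropWhile (fun x => !pvIsTop x))
termination_by ls => ls.length
decreasing_by
  simp only [List.length_cons]
  exact Nat.lt_succ_of_le (List.length_dropWhile_le _ _)

def chunk_by_indentation_py_alt (text : String) : List (String × (List (String × String))) :=
  let texts := (pvBlocks (pvLines text)).map (fun b => PySem.Str.strip (PySem.Str.join "\n" b))
  let chunks := (texts.filter (fun t => t ≠ "")).map
      (fun t => (t, [("name", "block"), ("type", "block")]))
  if chunks = [] then [(text, [("name", "module"), ("type", "module")])] else chunks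

-- ===== PRECONDITION & SPEC =====
def Spec_chunk_by_indentation_py (text : String) (out : List (String × (List (String × String)))) : Prop := out = chunk_by_indentation_py_alt text
instance (text : String) (out : List (String × (List (String × String)))) : Decidable (Spec_chunk_by_indentation_py text out) := by unfold Spec_chunk_by_indentation_py; infer_instance

-- ===== CLAIM (what is proved, stated in full; the proofs are below) =====
def Claim_equal_chunk_by_indentation_py : Prop := ∀ (text : String), Dom_chunk_by_indentation_py text → Spec_chunk_by_indentation_py text (chunk_by_indentation_py text)

-- ===== LEMMAS AND PROOFS =====

-- the chunk produced by one block (empty after strip ⇒ nothing)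
def pvRender1 (b : List String) : List (String × List (String × String)) :=
  if PySem.Str.strip (PySem.Str.join "\n" b) ≠ ""
  then [(PySem.Str.strip (PySem.Str.join "\n" b), [("name", "block"), ("type", "block")])] else []

-- the non-top prefix of the remaining lines (belongs to the block currently open)
def pvPref (ls : List String) : List String := ls.takeWhile (fun l => !pvIsTop l)

-- chunks contributed by the segments that START at a top-level line of ls
def pvChopT : List String → List (String × List (String × String))
  | [] => []
  | l :: rs => if pvIsTop l then pvRender1 (l :: pvPref rs) ++ pvChopT rs else pvChopT rs

theorem pvFlush_eq' (ch : List (String × List (String × String))) (b : List String) :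
    (if PySem.Str.strip (PySem.Str.join "\n" b) = "" then ch
      else ch ++ [(PySem.Str.strip (PySem.Str.join "\n" b), [("name", "block"), ("type", "block")])])
      = ch ++ pvRender1 b := by
  unfold pvRender1; split_ifs <;> simp_all

theorem pvLoopA (rest : List String) : ∀ (chunks : List (String × List (String × String)))
    (cur : List String), cur ≠ [] →
    (rest.foldl pvStepA (chunks, cur)).2 ≠ [] ∧
    (rest.foldl pvStepA (chunks, cur)).1 ++ pvRender1 (rest.foldl pvStepA (chunks, cur)).2
      = chunks ++ pvRender1 (cur ++ pvPref rest) ++ pvChopT rest := by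
  induction rest with
  | nil => intro chunks cur h; refine ⟨h, ?_⟩; simp [pvPref, pvChopT]
  | cons l rs ih =>
    intro chunks cur h
    by_cases ht : pvIsTop l = true
    · have hstep : pvStepA (chunks, cur) l = (chunks ++ pvRender1 cur, [l]) := by
        simp [pvStepA, ht, pvFlush_eq']
        exact fun hc => absurd hc h
      rw [List.foldl_cons, hstep]
      rcases ih (chunks ++ pvRender1 cur) [l] (by simp) with ⟨h1, h2⟩
      refine ⟨h1, ?_⟩
      rw [h2]
      simp [pvPref, pvChopT, ht]
    · have hstep : pvStepA (chunks, cur) l = (chunks, cur ++ [l]) := by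
        simp [pvStepA, ht]
      rw [List.foldl_cons, hstep]
      rcases ih chunks (cur ++ [l]) (by simp) with ⟨h1, h2⟩
      refine ⟨h1, ?_⟩
      rw [h2]
      simp [pvPref, pvChopT, ht]

-- B's join/strip/filter/tag pass over a block list = one render per block
theorem pvRenderPass (bs : List (List String)) :
    ((bs.map (fun b => PySem.Str.strip (PySem.Str.join "\n" b))).filter (fun t => t ≠ "")).map
      (fun t => (t, [("name", "block"), ("type", "block")])) = bs.flatMap pvRender1 := by
  induction bs with
  | nil => simp
  | cons b rest ih =>
    simp only [List.map_cons, List.filter_cons, List.flatMap_cons, ← ih]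
    by_cases h : PySem.Str.strip (PySem.Str.join "\n" b) = ""
    · simp [pvRender1, h]
    · simp [pvRender1, h]

-- blocks of the tail after dropping the open block's non-top lines = the top-started segments
theorem pvBlocks_drop (rs : List String) :
    (pvBlocks (rs.dropWhile (fun x => !pvIsTop x))).flatMap pvRender1 = pvChopT rs := by
  induction rs with
  | nil => simp [pvBlocks, pvChopT]
  | cons x xs ih =>
    by_cases ht : pvIsTop x = true
    · rw [List.dropWhile_cons_of_neg (by simp [ht])]
      rw [pvBlocks, List.flatMap_cons, ih]
      simp [pvChopT, ht, pvPref]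
    · rw [List.dropWhile_cons_of_pos (by simp [ht])]
      rw [ih]
      simp [pvChopT, ht]

theorem pvFlush_eq (ch : List (String × List (String × String))) (b : List String) :
    (if PySem.Str.strip (PySem.Str.join "\n" b) ≠ "" then
        ch ++ [(PySem.Str.strip (PySem.Str.join "\n" b), [("name", "block"), ("type", "block")])]
      else ch) = ch ++ pvRender1 b := by
  unfold pvRender1; split_ifs <;> simp

set_option maxHeartbeats 1000000 in
theorem chunk_core_eq (text : String) :
    chunk_by_indentation_py text = chunk_by_indentation_py_alt text := by
  unfold chunk_by_indentation_py chunk_by_indentation_py_alt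
  simp only [pvRenderPass]
  cases hls : pvLines text with
  | nil => rw [pvBlocks]; simp
  | cons l0 rest =>
    have hstep0 : pvStepA ([], []) l0 = ([], [l0]) := by simp [pvStepA]
    rcases pvLoopA rest [] [l0] (by simp) with ⟨hA1, hA2⟩
    simp only [List.foldl_cons, hstep0, if_pos hA1, pvFlush_eq]
    rw [hA2, pvBlocks, List.flatMap_cons, pvBlocks_drop]
    have hpref : [l0] ++ pvPref rest = l0 :: List.takeWhile (fun x => !pvIsTop x) rest := rfl
    rw [List.nil_append, hpref]

-- ===== VERDICT (by name: the statement is the Claim_ definition above) =====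
theorem chunk_by_indentation_py_spec : Claim_equal_chunk_by_indentation_py := by
  intro text _
  exact chunk_core_eq text
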